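-- pv_equiv track=rewrite | github.com/c4software/pyopds-server | server.py | has_path_traversal
-- ===== SOURCE A (Python) =====
-- def has_path_traversal(path):
--     """Check if path contains dangerous traversal sequences"""
--     dangerous_patterns = ['..', '~']
--
--     for pattern in dangerous_patterns:
--         if pattern in path:
--             return True
--
--     path_components = path.replace('\\', '/').split('/')
--     for component in path_components:
--         if component in dangerous_patterns or component.startswith('.'):
--             return True
--
--     return False
-- ===== SOURCE B (Python) =====
-- def has_path_traversal(path):
--     """Check if path contains dangerous traversal sequences"""
--     # single left-to-right scan; prev starts as '/' so a leading '.' counts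
--     # as a component that starts with a dot
--     prev = '/'
--     for ch in path:
--         if ch == '~' or (ch == '.' and prev in './\\'):
--             return True
--         prev = ch
--     return False
-- ===== Notes on version B (the rewrite author's own statement) =====
-- stated objective: alternative
-- what changed: Replaces A's substring checks plus backslash-normalize/split/per-component loop with a single left-to-right character scan that tracks the previous character ('~' anywhere, or '.' preceded by '.', '/', '\' or start of string).
import Mathlib
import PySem

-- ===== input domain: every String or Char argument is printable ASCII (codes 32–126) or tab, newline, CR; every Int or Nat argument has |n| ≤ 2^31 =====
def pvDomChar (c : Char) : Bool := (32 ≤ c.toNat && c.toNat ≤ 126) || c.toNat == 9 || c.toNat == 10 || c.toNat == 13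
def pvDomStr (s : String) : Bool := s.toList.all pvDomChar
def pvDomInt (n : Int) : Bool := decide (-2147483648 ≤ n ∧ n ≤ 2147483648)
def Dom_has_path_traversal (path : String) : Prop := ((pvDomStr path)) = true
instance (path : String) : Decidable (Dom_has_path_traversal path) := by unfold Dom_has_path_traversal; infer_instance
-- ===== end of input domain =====

-- B replaces A's substring checks + backslash-normalize/split/per-component loop with one
-- left-to-right character scan tracking the previous character (alternative decomposition).

-- ===== PORT A =====
def hptDangerous : List (List Char) := [['.', '.'], ['~']]

/-- `for pattern in dangerous_patterns: if pattern in path: return True` -/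
def hptLoop1 : List (List Char) → List Char → Bool
  | [], _ => false
  | p :: ps, l => if PySem.Chars.isIn p l then true else hptLoop1 ps l

/-- `for component in path_components: if component in dangerous_patterns or component.startswith('.'): return True` -/
def hptLoop2 : List (List Char) → Bool
  | [] => false
  | comp :: rest =>
    if hptDangerous.contains comp || PySem.Chars.startswith comp ['.'] then true
    else hptLoop2 rest

def has_path_traversal (path : String) : Bool :=
  if hptLoop1 hptDangerous path.toList then true
  else
    -- path_components = path.replace('\\', '/').split('/')
    hptLoop2 (PySem.Chars.splitOn (PySem.Chars.replace path.toList ['\\'] ['/']) ['/'])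

-- ===== PORT B =====
def hptScan : List Char → Char → Bool
  | [], _ => false
  | c :: rest, prev =>
    if c == '~' || (c == '.' && (prev == '.' || prev == '/' || prev == '\\')) then true
    else hptScan rest c

def has_path_traversal_alt (path : String) : Bool := hptScan path.toList '/'

-- ===== PRECONDITION & SPEC =====
def Spec_has_path_traversal (path : String) (out : Bool) : Prop := out = has_path_traversal_alt path
instance (path : String) (out : Bool) : Decidable (Spec_has_path_traversal path out) := by unfold Spec_has_path_traversal; infer_instance

-- ===== CLAIM (what is proved, stated in full; the proofs are below) =====
def Claim_equal_has_path_traversal : Prop := ∀ (path : String), Dom_has_path_traversal path → Spec_has_path_traversal path (has_path_traversal path)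

-- ===== LEMMAS AND PROOFS =====

/-- the single-char substitution performed by `path.replace('\\', '/')` -/
def hptSub (c : Char) : Char := if c = '\\' then '/' else c

/-- split on '/' : (first component, remaining components) -/
def hptSplit : List Char → List Char × List (List Char)
  | [] => ([], [])
  | c :: t =>
    let p := hptSplit t
    if c = '/' then ([], p.1 :: p.2) else (c :: p.1, p.2)

theorem hptSplit_nil : hptSplit [] = ([], []) := rfl

theorem hptSplit_cons_sep (t : List Char) :
    hptSplit ('/' :: t) = ([], (hptSplit t).1 :: (hptSplit t).2) := by simp [hptSplit]

theorem hptSplit_cons_ne (c : Char) (t : List Char) (hc : c ≠ '/') :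
    hptSplit (c :: t) = (c :: (hptSplit t).1, (hptSplit t).2) := by simp [hptSplit, hc]

theorem hptSub_eq_slash (c : Char) : hptSub c = '/' ↔ (c = '/' ∨ c = '\\') := by
  by_cases hc : c = '\\'
  · subst hc; decide
  · simp [hptSub, hc]

theorem hptSub_eq_dot (c : Char) : hptSub c = '.' ↔ c = '.' := by
  by_cases hc : c = '\\'
  · subst hc; decide
  · simp [hptSub, hc]

theorem hptSub_eq_tilde (c : Char) : hptSub c = '~' ↔ c = '~' := by
  by_cases hc : c = '\\'
  · subst hc; decide
  · simp [hptSub, hc]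

theorem hptLoop1_eq_any (ps : List (List Char)) (l : List Char) :
    hptLoop1 ps l = ps.any (fun p => PySem.Chars.isIn p l) := by
  induction ps with
  | nil => rfl
  | cons p ps ih =>
    by_cases h : PySem.Chars.isIn p l = true <;> simp [hptLoop1, h, ih]

theorem hptLoop2_eq_any (cs : List (List Char)) :
    hptLoop2 cs = cs.any (fun comp => hptDangerous.contains comp || PySem.Chars.startswith comp ['.']) := by
  induction cs with
  | nil => rfl
  | cons comp rest ih =>
    by_cases h : (hptDangerous.contains comp || PySem.Chars.startswith comp ['.']) = true <;>
      simp [hptLoop2, ih]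

theorem hpt_replace_go (fuel : Nat) : ∀ (l acc : List Char), l.length ≤ fuel →
    PySem.Chars.replace.go ['\\'] ['/'] fuel l acc = acc.reverse ++ l.map hptSub := by
  induction fuel with
  | zero =>
    intro l acc h
    have : l = [] := by cases l <;> simp_all
    subst this; simp [PySem.Chars.replace.go]
  | succ n ih =>
    intro l acc h
    cases l with
    | nil => simp [PySem.Chars.replace.go]
    | cons c t =>
      by_cases hc : c = '\\'
      · subst hc
        rw [PySem.Chars.replace.go]
        rw [if_pos (by simp)]
        simp only [List.length_cons] at h
        rw [ih _ _ (by simp; omega)]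
        simp [hptSub]
      · rw [PySem.Chars.replace.go]
        rw [if_neg (fun hpre => hc (by
          rw [List.isPrefixOf_iff_prefix] at hpre
          exact ((List.cons_prefix_cons.mp hpre).1).symm))]
        simp only [List.length_cons] at h
        rw [ih _ _ (by omega)]
        simp [hptSub, hc]

theorem hpt_replace_eq (l : List Char) :
    PySem.Chars.replace l ['\\'] ['/'] = l.map hptSub := by
  rw [PySem.Chars.replace]
  rw [if_neg (by simp)]
  rw [hpt_replace_go l.length l [] le_rfl]
  simp

theorem hpt_splitOn_go (fuel : Nat) : ∀ (l cur : List Char) (acc : List (List Char)),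
    l.length < fuel →
    PySem.Chars.splitOn.go ['/'] fuel l cur acc
      = acc.reverse ++ (cur.reverse ++ (hptSplit l).1) :: (hptSplit l).2 := by
  induction fuel with
  | zero => intro l cur acc h; omega
  | succ n ih =>
    intro l cur acc h
    cases l with
    | nil => simp [PySem.Chars.splitOn.go, hptSplit_nil]
    | cons c t =>
      by_cases hc : c = '/'
      · subst hc
        rw [PySem.Chars.splitOn.go]
        rw [if_pos (by simp)]
        simp only [List.length_cons] at h
        rw [ih _ _ _ (by simp; omega)]
        simp [hptSplit_cons_sep]
      · rw [PySem.Chars.splitOn.go]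
        rw [if_neg (fun hpre => hc (by
          rw [List.isPrefixOf_iff_prefix] at hpre
          exact ((List.cons_prefix_cons.mp hpre).1).symm))]
        simp only [List.length_cons] at h
        rw [ih _ _ _ (by omega)]
        simp [hptSplit_cons_ne c t hc]

theorem hpt_splitOn_eq (l : List Char) :
    PySem.Chars.splitOn l ['/'] = (hptSplit l).1 :: (hptSplit l).2 := by
  rw [PySem.Chars.splitOn]
  rw [hpt_splitOn_go (l.length + 1) l [] [] (by omega)]
  simp

theorem hpt_sing_pref (b : Char) (t : List Char) : [b] <+: t ↔ t.head? = some b := by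
  cases t with
  | nil => simp
  | cons c r =>
    simp only [List.cons_prefix_cons, List.nil_prefix, and_true, List.head?_cons,
      Option.some.injEq]
    exact eq_comm

theorem hpt_pair_pref (a b : Char) (t : List Char) :
    [a, b] <+: t ↔ t.head? = some a ∧ t.tail.head? = some b := by
  cases t with
  | nil => simp
  | cons c r =>
    simp only [List.cons_prefix_cons, hpt_sing_pref, List.head?_cons, List.tail_cons,
      Option.some.injEq]
    constructor
    · rintro ⟨h1, h2⟩; exact ⟨h1.symm, h2⟩
    · rintro ⟨h1, h2⟩; exact ⟨h1.symm, h2⟩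

theorem hpt_startswith_dot (c : List Char) :
    PySem.Chars.startswith c ['.'] = true ↔ c.head? = some '.' := by
  simp [PySem.Chars.startswith, List.isPrefixOf_iff_prefix, hpt_sing_pref]

/-- the first component of the split is a prefix of the string -/
theorem hpt_split_fst_prefix (l : List Char) : (hptSplit l).1 <+: l := by
  induction l with
  | nil => simp [hptSplit_nil]
  | cons c t ih =>
    by_cases hc : c = '/'
    · subst hc; simp [hptSplit_cons_sep]
    · rw [hptSplit_cons_ne c t hc]
      simpa [List.cons_prefix_cons] using ih

/-- every component of the split is an infix of the string -/
theorem hpt_split_mem_infix (l : List Char) (comp : List Char)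
    (h : comp ∈ (hptSplit l).1 :: (hptSplit l).2) : comp <:+: l := by
  induction l generalizing comp with
  | nil =>
    rw [hptSplit_nil] at h
    simp at h
    simp [h]
  | cons c t ih =>
    by_cases hc : c = '/'
    · subst hc
      rw [hptSplit_cons_sep] at h
      simp at h
      rcases h with h | h
      · simp [h]
      · exact List.infix_cons_iff.mpr (Or.inr (ih comp (by simpa using h)))
    · rw [hptSplit_cons_ne c t hc] at h
      rcases List.mem_cons.mp h with h | h
      · subst h
        refine List.IsPrefix.isInfix ?_
        simpa [List.cons_prefix_cons] using hpt_split_fst_prefix t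
      · exact List.infix_cons_iff.mpr (Or.inr (ih comp (List.mem_cons_of_mem _ h)))

theorem hpt_split_fst_head (l : List Char) :
    (hptSplit l).1.head? = some '.' ↔ l.head? = some '.' := by
  cases l with
  | nil => simp [hptSplit_nil]
  | cons c t =>
    by_cases hc : c = '/'
    · subst hc
      rw [hptSplit_cons_sep]
      simp only [List.head?_nil, List.head?_cons]
      constructor
      · intro h; exact absurd h (by decide)
      · intro h; exact absurd h.symm (by decide)
    · rw [hptSplit_cons_ne c t hc]; simp

theorem hpt_split_snd_dot (l : List Char) :
    ((hptSplit l).2.any (fun comp => PySem.Chars.startswith comp ['.']) = true)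
      ↔ ['/', '.'] <:+: l := by
  induction l with
  | nil => simp [hptSplit_nil]
  | cons c t ih =>
    rw [List.infix_cons_iff, hpt_pair_pref]
    by_cases hc : c = '/'
    · subst hc
      rw [hptSplit_cons_sep]
      simp only [List.any_cons, Bool.or_eq_true, ih, hpt_startswith_dot, hpt_split_fst_head,
        List.head?_cons, List.tail_cons]
      tauto
    · rw [hptSplit_cons_ne c t hc]
      simp only [ih, List.head?_cons, List.tail_cons, Option.some.injEq]
      constructor
      · intro h; exact Or.inr h
      · rintro (⟨h1, -⟩ | h)
        · exact absurd h1 hc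
        · exact h

theorem hpt_scan_iff (l : List Char) : ∀ (prev : Char),
    hptScan l prev = true ↔
      ('~' ∈ l ∨ ['.', '.'] <:+: l ∨ ['/', '.'] <:+: l ∨ ['\\', '.'] <:+: l
        ∨ (l.head? = some '.' ∧ (prev = '.' ∨ prev = '/' ∨ prev = '\\'))) := by
  induction l with
  | nil => intro prev; simp [hptScan]
  | cons c t ih =>
    intro prev
    rw [hptScan]
    by_cases hcond : (c == '~' || (c == '.' && (prev == '.' || prev == '/' || prev == '\\'))) = true
    · rw [if_pos hcond]
      simp only [Bool.or_eq_true, Bool.and_eq_true, beq_iff_eq] at hcond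
      constructor
      · intro _
        rcases hcond with h | ⟨h, hp⟩
        · left; simp [h]
        · right; right; right; right
          exact ⟨by simp [h], by tauto⟩
      · intro _; rfl
    · rw [if_neg hcond]
      simp only [Bool.or_eq_true, Bool.and_eq_true, beq_iff_eq, not_or, not_and_or] at hcond
      rw [ih c]
      simp only [List.mem_cons, List.infix_cons_iff, hpt_pair_pref, List.head?_cons,
        List.tail_cons, Option.some.injEq]
      constructor
      · rintro (h | h | h | h | ⟨h1, h2⟩)
        · exact Or.inl (Or.inr h)
        · exact Or.inr (Or.inl (Or.inr h))
        · exact Or.inr (Or.inr (Or.inl (Or.inr h)))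
        · exact Or.inr (Or.inr (Or.inr (Or.inl (Or.inr h))))
        · -- t starts with '.', and c is '.', '/' or '\\': a two-char infix at the head
          rcases h2 with h2 | h2 | h2
          · exact Or.inr (Or.inl (Or.inl ⟨h2, h1⟩))
          · exact Or.inr (Or.inr (Or.inl (Or.inl ⟨h2, h1⟩)))
          · exact Or.inr (Or.inr (Or.inr (Or.inl (Or.inl ⟨h2, h1⟩))))
      · rintro (h | (⟨h1, h2⟩ | h) | (⟨h1, h2⟩ | h) | (⟨h1, h2⟩ | h) | ⟨h1, h2⟩)
        · rcases h with h | h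
          · exact absurd h.symm (by tauto)
          · exact Or.inl h
        · exact Or.inr (Or.inr (Or.inr (Or.inr ⟨h2, Or.inl h1⟩)))
        · exact Or.inr (Or.inl h)
        · exact Or.inr (Or.inr (Or.inr (Or.inr ⟨h2, Or.inr (Or.inl h1)⟩)))
        · exact Or.inr (Or.inr (Or.inl h))
        · exact Or.inr (Or.inr (Or.inr (Or.inr ⟨h2, Or.inr (Or.inr h1)⟩)))
        · exact Or.inr (Or.inr (Or.inr (Or.inl h)))
        · -- c = '.' with a suitable prev would have fired the scan's condition
          exact absurd h1 (by tauto)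

theorem hpt_map_mem_tilde (l : List Char) : '~' ∈ l.map hptSub ↔ '~' ∈ l := by
  constructor
  · intro h
    obtain ⟨c, hc, h⟩ := List.mem_map.mp h
    rw [show hptSub c = '~' ↔ c = '~' from hptSub_eq_tilde c] at h
    exact h ▸ hc
  · intro h
    exact List.mem_map.mpr ⟨'~', h, by decide⟩

theorem hpt_map_head (l : List Char) :
    (l.map hptSub).head? = some '.' ↔ l.head? = some '.' := by
  cases l with
  | nil => simp
  | cons c t =>
    simp only [List.map_cons, List.head?_cons, Option.some.injEq]
    exact hptSub_eq_dot c

theorem hpt_map_dots (l : List Char) :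
    ['.', '.'] <:+: l.map hptSub ↔ ['.', '.'] <:+: l := by
  induction l with
  | nil => simp
  | cons c t ih =>
    simp only [List.map_cons, List.infix_cons_iff, hpt_pair_pref, List.head?_cons,
      List.tail_cons, Option.some.injEq, ih, hpt_map_head, hptSub_eq_dot]

theorem hpt_map_slashdot (l : List Char) :
    ['/', '.'] <:+: l.map hptSub ↔ (['/', '.'] <:+: l ∨ ['\\', '.'] <:+: l) := by
  induction l with
  | nil => simp
  | cons c t ih =>
    simp only [List.map_cons, List.infix_cons_iff, hpt_pair_pref, List.head?_cons,
      List.tail_cons, Option.some.injEq, ih, hpt_map_head, hptSub_eq_slash]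
    tauto

theorem hpt_main (l : List Char) :
    (if hptLoop1 hptDangerous l then true
     else hptLoop2 (PySem.Chars.splitOn (PySem.Chars.replace l ['\\'] ['/']) ['/']))
      = hptScan l '/' := by
  simp only [hptLoop1_eq_any, hptLoop2_eq_any, hpt_replace_eq, hpt_splitOn_eq]
  rw [Bool.eq_iff_iff, hpt_scan_iff l '/']
  constructor
  · intro h
    by_cases hin : (hptDangerous.any (fun p => PySem.Chars.isIn p l)) = true
    · -- a dangerous substring was found in the original path
      simp only [hptDangerous, List.any_cons, List.any_nil, Bool.or_eq_true, Bool.or_false,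
        PySem.Chars.isIn_iff_infix, List.singleton_infix_iff] at hin
      rcases hin with hin | hin
      · exact Or.inr (Or.inl hin)
      · exact Or.inl hin
    · rw [if_neg hin] at h
      -- some component is dangerous or starts with '.'
      simp only [List.any_eq_true, Bool.or_eq_true] at h
      obtain ⟨comp, hmem, hbad⟩ := h
      rcases hbad with hdang | hdot
      · -- component equals '..' or '~' : then it is an infix of the mapped string
        have hinf := hpt_split_mem_infix _ comp hmem
        simp only [hptDangerous, List.contains_eq_mem, List.mem_cons, List.not_mem_nil,
          or_false, decide_eq_true_eq] at hdang
        rcases hdang with rfl | rfl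
        · exact Or.inr (Or.inl ((hpt_map_dots l).mp hinf))
        · exact Or.inl ((hpt_map_mem_tilde l).mp ((List.singleton_infix_iff _ _).mp hinf))
      · -- component starts with '.'
        rw [hpt_startswith_dot] at hdot
        rcases List.mem_cons.mp hmem with hmem | hmem
        · have : (l.map hptSub).head? = some '.' := by
            rw [← hpt_split_fst_head, ← hmem]; exact hdot
          exact Or.inr (Or.inr (Or.inr (Or.inr ⟨(hpt_map_head l).mp this, by tauto⟩)))
        · have hsnd : ((hptSplit (l.map hptSub)).2.any
              (fun comp => PySem.Chars.startswith comp ['.']) = true) := by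
            simp only [List.any_eq_true]
            exact ⟨comp, hmem, by rw [hpt_startswith_dot]; exact hdot⟩
          rcases (hpt_map_slashdot l).mp ((hpt_split_snd_dot _).mp hsnd) with h' | h'
          · exact Or.inr (Or.inr (Or.inl h'))
          · exact Or.inr (Or.inr (Or.inr (Or.inl h')))
  · intro h
    by_cases hin : (hptDangerous.any (fun p => PySem.Chars.isIn p l)) = true
    · rw [if_pos hin]
    · rw [if_neg hin]
      simp only [hptDangerous, List.any_cons, List.any_nil, Bool.or_eq_true, Bool.or_false,
        PySem.Chars.isIn_iff_infix, List.singleton_infix_iff, not_or] at hin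
      rcases h with h | h | h | h | ⟨h, -⟩
      · exact absurd h hin.2
      · exact absurd h hin.1
      · -- '.' right after '/': the corresponding component starts with '.'
        have hsnd := (hpt_split_snd_dot (l.map hptSub)).mpr
          ((hpt_map_slashdot l).mpr (Or.inl h))
        simp only [List.any_eq_true, Bool.or_eq_true] at hsnd ⊢
        obtain ⟨comp, hmem, hdot⟩ := hsnd
        exact ⟨comp, List.mem_cons_of_mem _ hmem, Or.inr hdot⟩
      · have hsnd := (hpt_split_snd_dot (l.map hptSub)).mpr
          ((hpt_map_slashdot l).mpr (Or.inr h))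
        simp only [List.any_eq_true, Bool.or_eq_true] at hsnd ⊢
        obtain ⟨comp, hmem, hdot⟩ := hsnd
        exact ⟨comp, List.mem_cons_of_mem _ hmem, Or.inr hdot⟩
      · -- leading '.': the first component starts with '.'
        have hh : (hptSplit (l.map hptSub)).1.head? = some '.' := by
          rw [hpt_split_fst_head, hpt_map_head]; exact h
        simp only [List.any_eq_true, Bool.or_eq_true]
        exact ⟨(hptSplit (l.map hptSub)).1, List.mem_cons_self,
          Or.inr (by rw [hpt_startswith_dot]; exact hh)⟩

-- ===== VERDICT (by name: the statement is the Claim_ definition above) =====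
theorem has_path_traversal_spec : Claim_equal_has_path_traversal := by
  intro path _
  unfold Spec_has_path_traversal has_path_traversal has_path_traversal_alt
  exact hpt_main path.toList
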